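-- pv_equiv track=rewrite | github.com/Saisoft-Global/neovision | api/models/document_processor.py | _is_line_items_table
-- ===== SOURCE A (Python) =====
-- from typing import Dict, Any, List, Optional
--
-- def _is_line_items_table(headers: List[str]) -> bool:
--     """Check if table contains line items"""
--     header_keywords = {
--         "item", "description", "quantity", "qty", "price",
--         "amount", "total", "unit", "sku", "part"
--     }
--     return any(
--         any(keyword in header.lower() for keyword in header_keywords)
--         for header in headers if header
--     )
-- ===== SOURCE B (Python) =====
-- from typing import List
--
-- def _is_line_items_table(headers: List[str]) -> bool:
--     """Check if table contains line items"""
--     header_keywords = {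
--         "item", "description", "quantity", "qty", "price",
--         "amount", "total", "unit", "sku", "part"
--     }
--     # Build one combined lowercase text; a space separator cannot create a
--     # spurious match because no keyword contains a space.
--     text = " ".join(h.lower() for h in headers if h)
--     return any(keyword in text for keyword in header_keywords)
-- ===== Notes on version B (the rewrite author's own statement) =====
-- stated objective: faster
-- what changed: Replaces the per-header nested any-loops by a build-then-scan decomposition: all non-empty headers are concatenated once into a single lowercase space-joined string, and the fixed 10-keyword set is scanned once against that combined text (safe because no keyword contains a space), so only 10 C-level substring searches run instead of up to 10 per header.
import Mathlib
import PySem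

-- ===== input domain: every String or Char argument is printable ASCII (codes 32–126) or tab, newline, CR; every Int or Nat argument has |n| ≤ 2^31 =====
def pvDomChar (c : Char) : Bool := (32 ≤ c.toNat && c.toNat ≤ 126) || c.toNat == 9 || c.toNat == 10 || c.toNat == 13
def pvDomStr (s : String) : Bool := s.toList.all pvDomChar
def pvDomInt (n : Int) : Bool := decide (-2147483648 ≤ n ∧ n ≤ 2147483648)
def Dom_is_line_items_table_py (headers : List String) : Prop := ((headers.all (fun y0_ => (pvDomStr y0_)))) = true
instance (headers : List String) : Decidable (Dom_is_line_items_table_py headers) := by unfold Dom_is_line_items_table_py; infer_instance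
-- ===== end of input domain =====

-- B joins all non-empty lowercased headers into one space-separated text and scans the
-- keywords once against it (a space separator is safe: no keyword contains a space);
-- same result, different decomposition.

-- ===== PORT A =====
-- the set literal of keywords (iteration order is irrelevant to `any`)
def pvKeywords : List String :=
  ["item", "description", "quantity", "qty", "price",
   "amount", "total", "unit", "sku", "part"]

def is_line_items_table_py (headers : List String) : Bool :=
  headers.any (fun header =>
    (header != "") &&
    pvKeywords.any (fun keyword => PySem.Str.isIn keyword (PySem.Str.lower header)))

-- ===== PORT B =====
def is_line_items_table_py_alt (headers : List String) : Bool :=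
  let text := PySem.Str.join " " ((headers.filter (fun h => h != "")).map PySem.Str.lower)
  pvKeywords.any (fun keyword => PySem.Str.isIn keyword text)

-- ===== PRECONDITION & SPEC =====
def Spec_is_line_items_table_py (headers : List String) (out : Bool) : Prop := out = is_line_items_table_py_alt headers
instance (headers : List String) (out : Bool) : Decidable (Spec_is_line_items_table_py headers out) := by unfold Spec_is_line_items_table_py; infer_instance

-- ===== CLAIM (what is proved, stated in full; the proofs are below) =====
def Claim_equal_is_line_items_table_py : Prop := ∀ (headers : List String), Dom_is_line_items_table_py headers → Spec_is_line_items_table_py headers (is_line_items_table_py headers)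

-- ===== LEMMAS AND PROOFS =====

-- every keyword is nonempty and contains no space
theorem pvKeywords_ok : ∀ kw ∈ pvKeywords, kw.toList ≠ [] ∧ ' ' ∉ kw.toList := by decide

-- a prefix of p ++ c :: q that avoids c is a prefix of p
theorem prefix_no_sep {kw : List Char} {c : Char} (hc : c ∉ kw) :
    ∀ p q : List Char, kw <+: p ++ c :: q → kw <+: p := by
  induction kw with
  | nil => intro p q _; exact List.nil_prefix
  | cons k kw' ih =>
    intro p q h
    cases p with
    | nil =>
      exfalso
      rcases h with ⟨t, ht⟩
      simp at ht
      exact hc (ht.1 ▸ List.mem_cons_self)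
    | cons a p' =>
      rcases h with ⟨t, ht⟩
      simp at ht
      obtain ⟨rfl, ht2⟩ := ht
      have hpre : kw' <+: p' ++ c :: q := ⟨t, ht2⟩
      have hkp : kw' <+: p' := ih (fun hm => hc (List.mem_cons_of_mem _ hm)) p' q hpre
      obtain ⟨t', rfl⟩ := hkp
      exact ⟨t', rfl⟩

-- an infix of p ++ c :: q that avoids c lies in p or in q
theorem infix_split {kw : List Char} {c : Char} (hne : kw ≠ []) (hc : c ∉ kw) :
    ∀ p q : List Char, (kw <:+: p ++ c :: q ↔ kw <:+: p ∨ kw <:+: q) := by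
  intro p q
  constructor
  · rintro ⟨s, t, hst⟩
    induction p generalizing s with
    | nil =>
      cases s with
      | nil =>
        exfalso
        simp at hst
        cases kw with
        | nil => exact hne rfl
        | cons k kw' =>
          simp at hst
          exact hc (hst.1 ▸ List.mem_cons_self)
      | cons a s' =>
        simp at hst
        exact Or.inr ⟨s', t, by simpa [List.append_assoc] using hst.2⟩
    | cons b p' ih =>
      cases s with
      | nil =>
        simp at hst
        have hpre : kw <+: b :: p' ++ c :: q := ⟨t, by simpa using hst⟩
        exact Or.inl (List.IsPrefix.isInfix (prefix_no_sep hc (b :: p') q hpre))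
      | cons a s' =>
        simp at hst
        obtain ⟨rfl, hst2⟩ := hst
        rcases ih s' (by simpa [List.append_assoc] using hst2) with h | h
        · exact Or.inl (h.trans (List.infix_cons (List.infix_refl p')))
        · exact Or.inr h
  · rintro (h | h)
    · exact h.trans ⟨[], c :: q, rfl⟩
    · exact h.trans ⟨p ++ [c], [], by simp⟩

-- an infix of the c-joined parts that avoids c is an infix of one of the parts
theorem infix_join {kw : List Char} {c : Char} (hne : kw ≠ []) (hc : c ∉ kw) :
    ∀ parts : List (List Char),
      (kw <:+: PySem.Chars.join [c] parts ↔ ∃ p ∈ parts, kw <:+: p) := by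
  intro parts
  induction parts with
  | nil =>
    simp [PySem.Chars.join_nil]
    intro h
    exact hne h
  | cons p rest ih =>
    cases rest with
    | nil => simp [PySem.Chars.join_singleton]
    | cons q rest' =>
      rw [PySem.Chars.join_cons_cons]
      have : p ++ [c] ++ PySem.Chars.join [c] (q :: rest')
           = p ++ c :: PySem.Chars.join [c] (q :: rest') := by simp
      rw [this, infix_split hne hc]
      simp [ih]

-- ===== VERDICT (by name: the statement is the Claim_ definition above) =====
theorem is_line_items_table_py_spec : Claim_equal_is_line_items_table_py := by
  intro headers _
  unfold Spec_is_line_items_table_py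
  rw [Bool.eq_iff_iff]
  simp only [is_line_items_table_py, is_line_items_table_py_alt,
    List.any_eq_true, Bool.and_eq_true, bne_iff_ne, ne_eq,
    PySem.Str.isIn_iff_infix, PySem.Str.toList_join, PySem.Str.toList_lower]
  constructor
  · rintro ⟨h, hmem, hne, kw, hkw, hinf⟩
    refine ⟨kw, hkw, ?_⟩
    obtain ⟨hkne, hksp⟩ := pvKeywords_ok kw hkw
    rw [show (" " : String).toList = [' '] from rfl,
       infix_join hkne hksp]
    refine ⟨(PySem.Str.lower h).toList, ?_, ?_⟩
    · simp only [List.mem_map, List.mem_filter, bne_iff_ne, ne_eq]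
      exact ⟨PySem.Str.lower h, ⟨h, ⟨hmem, hne⟩, rfl⟩, rfl⟩
    · rw [PySem.Str.toList_lower]; exact hinf
  · rintro ⟨kw, hkw, hinf⟩
    obtain ⟨hkne, hksp⟩ := pvKeywords_ok kw hkw
    rw [show (" " : String).toList = [' '] from rfl,
       infix_join hkne hksp] at hinf
    obtain ⟨p, hp, hinf⟩ := hinf
    simp only [List.mem_map, List.mem_filter, bne_iff_ne, ne_eq] at hp
    obtain ⟨s, ⟨h, ⟨hmem, hne⟩, rfl⟩, rfl⟩ := hp
    rw [PySem.Str.toList_lower] at hinf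
    exact ⟨h, hmem, hne, kw, hkw, hinf⟩
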